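-- pv_equiv track=rewrite | github.com/Telhassani/openclaw-config | skills/ai-pulse-tracker/ranker.py | categorize_videos
-- ===== SOURCE A (Python) =====
-- from typing import List, Dict
--
-- def categorize_videos(
--     videos: List[Dict],
--     categories: Dict
-- ) -> List[str]:
--     """
--     Assign each video to primary category based on keyword matching.
--     Returns list of category names (same order as input videos).
--     """
--     result = []
--
--     for video in videos:
--         text = (video.get('title', '') + video.get('description', '')).lower()
--
--         # Find best matching category
--         best_category = "infrastructure"  # default
--         best_score = 0
--
--         for category, keywords in categories.items():
--             matches = sum(1 for kw in keywords if kw in text)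
--             if matches > best_score:
--                 best_score = matches
--                 best_category = category
--
--         result.append(best_category.replace('_', ' ').title())
--
--     return result
-- ===== SOURCE B (Python) =====
-- def categorize_videos(videos, categories):
--     """
--     Assign each video to primary category based on keyword matching.
--     Multi-pattern position scan: index all keywords by first character once,
--     then for each video walk the text left to right collecting the set of
--     matched keywords in a single pass, and score categories by set lookups.
--     """
--     # Build the keyword index once: first char -> keywords starting with it.
--     seen = set()
--     by_first = {}
--     has_empty = False
--     for _, kws in categories.items():
--         for kw in kws:
--             if kw not in seen:
--                 seen.add(kw)
--                 if kw:
--                     by_first.setdefault(kw[0], []).append(kw)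
--                 else:
--                     has_empty = True
--
--     out = []
--     for video in videos:
--         text = (video.get('title', '') + video.get('description', '')).lower()
--         # One left-to-right scan: at each position try only the keywords
--         # whose first character is the current one.
--         matched = {""} if has_empty else set()
--         for j, c in enumerate(text):
--             for kw in by_first.get(c, []):
--                 if text.startswith(kw, j):
--                     matched.add(kw)
--         # Score each category by membership in the matched set.
--         best, best_score = "infrastructure", 0
--         for name, kws in categories.items():
--             score = sum(1 for kw in kws if kw in matched)
--             if score > best_score:
--                 best, best_score = name, score
--         out.append(best.replace('_', ' ').title())
--     return out
-- ===== Notes on version B (the rewrite author's own statement) =====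
-- stated objective: alternative
-- what changed: Replaces A's per-category per-keyword substring ('kw in text') scans by a first-char-indexed multi-pattern position scan that builds the set of matched keywords in one left-to-right pass per video, with categories then scored by set lookups.
import Mathlib
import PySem

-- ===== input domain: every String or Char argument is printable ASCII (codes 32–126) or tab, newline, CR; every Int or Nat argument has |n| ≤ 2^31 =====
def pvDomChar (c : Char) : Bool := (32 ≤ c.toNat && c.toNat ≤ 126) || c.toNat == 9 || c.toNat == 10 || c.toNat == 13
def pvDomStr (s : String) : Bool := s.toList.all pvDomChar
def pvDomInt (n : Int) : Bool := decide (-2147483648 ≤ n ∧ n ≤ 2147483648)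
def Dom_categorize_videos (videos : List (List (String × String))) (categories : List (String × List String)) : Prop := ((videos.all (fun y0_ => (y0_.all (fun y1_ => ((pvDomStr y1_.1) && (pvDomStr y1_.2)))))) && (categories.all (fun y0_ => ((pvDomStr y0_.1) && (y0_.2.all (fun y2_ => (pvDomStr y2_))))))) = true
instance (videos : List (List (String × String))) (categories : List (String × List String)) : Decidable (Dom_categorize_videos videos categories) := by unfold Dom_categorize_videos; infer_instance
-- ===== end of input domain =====

-- B replaces A's per-category per-keyword substring scans by a first-char-indexed
-- multi-pattern position scan collecting the matched-keyword set in one pass per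
-- video, categories then scored by set lookups (objective: alternative algorithm).

-- shared primitives (the same Python sub-expressions occur verbatim in A and B)

-- str.title() for ASCII, hand-ported (PySem has no title): a char is upper-cased
-- when the previous char is not a letter, lower-cased otherwise; exact on ASCII
-- where Python's "cased" = alphabetic.
def pvTitleChars : List Char → Bool → List Char
  | [], _ => []
  | c :: t, prevAlpha =>
    (if PySem.Chars.isalpha c then
       (if prevAlpha then PySem.Chars.lowerChar c else PySem.Chars.upperChar c)
     else c) :: pvTitleChars t (PySem.Chars.isalpha c)

def pvTitle (s : String) : String := String.ofList (pvTitleChars s.toList false)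

-- (video.get('title','') + video.get('description','')).lower()
def pvVideoText (video : List (String × String)) : String :=
  PySem.Str.lower (PySem.Dict.getD (PySem.Dict.mk video) "title" "" ++
                   PySem.Dict.getD (PySem.Dict.mk video) "description" "")

-- ===== PORT A =====
-- sum(1 for kw in keywords if kw in text)
def pvMatchCount (kws : List String) (text : String) : Int :=
  ((kws.filter (fun kw => PySem.Str.isIn kw text)).map (fun _ => (1 : Int))).sum

def categorize_videos (videos : List (List (String × String))) (categories : List (String × List String)) : List String :=
  videos.foldl
    (fun result video =>
      let text := pvVideoText video
      let best :=
        categories.foldl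
          (fun (b : String × Int) ck =>
            let mcount := pvMatchCount ck.2 text
            if mcount > b.2 then (ck.1, mcount) else b)
          ("infrastructure", 0)
      result ++ [pvTitle (PySem.Str.replace best.1 "_" " ")])
    []

-- ===== PORT B =====
-- keyword index build of Source B: state = (seen, by_first, has_empty);
-- by_first.setdefault(kw[0], []).append(kw) = insert kw[0] (getD kw[0] [] ++ [kw]) (exact).
def pvBuildIndex (categories : List (String × List String)) :
    PySem.Set String × PySem.Dict Char (List String) × Bool :=
  categories.foldl
    (fun st ck =>
      ck.2.foldl
        (fun st kw =>
          if PySem.Set.contains st.1 kw then st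
          else
            match kw.toList with
            | [] => (PySem.Set.add st.1 kw, st.2.1, true)
            | c :: _ => (PySem.Set.add st.1 kw,
                         st.2.1.insert c (st.2.1.getD c [] ++ [kw]), st.2.2))
        st)
    (PySem.Set.empty, PySem.Dict.empty, false)

-- the per-video scan of Source B: 'for j, c in enumerate(text): for kw in by_first.get(c, []):
--   if text.startswith(kw, j): matched.add(kw)'.
-- text.startswith(kw, j) with 0 ≤ j from enumerate is exactly 'kw is a prefix of text[j:]'.
def pvScan (byFirst : PySem.Dict Char (List String)) (hasEmpty : Bool) (textL : List Char) : PySem.Set String :=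
  (PySem.List.enumerate textL 0).foldl
    (fun m jc =>
      (byFirst.getD jc.2 []).foldl
        (fun m kw =>
          if PySem.Chars.startswith (textL.drop jc.1.toNat) kw.toList then PySem.Set.add m kw else m)
        m)
    (if hasEmpty then PySem.Set.ofList [""] else PySem.Set.empty)

-- sum(1 for kw in kws if kw in matched)
def pvSetCount (kws : List String) (m : PySem.Set String) : Int :=
  ((kws.filter (fun kw => PySem.Set.contains m kw)).map (fun _ => (1 : Int))).sum

def categorize_videos_alt (videos : List (List (String × String))) (categories : List (String × List String)) : List String :=
  let idx := pvBuildIndex categories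
  videos.map (fun video =>
    let text := pvVideoText video
    let matched := pvScan idx.2.1 idx.2.2 text.toList
    let best :=
      categories.foldl
        (fun (b : String × Int) ck =>
          let score := pvSetCount ck.2 matched
          if score > b.2 then (ck.1, score) else b)
        ("infrastructure", 0)
    pvTitle (PySem.Str.replace best.1 "_" " "))

-- ===== PRECONDITION & SPEC =====
def Spec_categorize_videos (videos : List (List (String × String))) (categories : List (String × List String)) (out : List String) : Prop := out = categorize_videos_alt videos categories
instance (videos : List (List (String × String))) (categories : List (String × List String)) (out : List String) : Decidable (Spec_categorize_videos videos categories out) := by unfold Spec_categorize_videos; infer_instance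

-- ===== CLAIM (what is proved, stated in full; the proofs are below) =====
def Claim_equal_categorize_videos : Prop := ∀ (videos : List (List (String × String))) (categories : List (String × List String)), Dom_categorize_videos videos categories → Spec_categorize_videos videos categories (categorize_videos videos categories)

-- ===== LEMMAS AND PROOFS =====

-- invariant of the index-building fold: L = "keywords processed so far"
def pvInv (L : String → Prop) (st : PySem.Set String × PySem.Dict Char (List String) × Bool) : Prop :=
  (∀ x, x ∈ st.1 ↔ L x) ∧ (st.2.2 = true ↔ L "") ∧
  (∀ (c : Char) (x : String), x ∈ st.2.1.getD c [] ↔ L x ∧ x.toList.head? = some c)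

theorem pvInv_congr {L L' : String → Prop} {st : PySem.Set String × PySem.Dict Char (List String) × Bool}
    (h : pvInv L st) (he : ∀ x, L x ↔ L' x) : pvInv L' st :=
  ⟨fun x => (h.1 x).trans (he x), h.2.1.trans (he ""),
   fun c x => (h.2.2 c x).trans (and_congr_left fun _ => he x)⟩

-- one inner step of pvBuildIndex preserves the invariant
theorem pvInv_step {L : String → Prop} {st : PySem.Set String × PySem.Dict Char (List String) × Bool}
    (h : pvInv L st) (kw : String) :
    pvInv (fun x => L x ∨ x = kw)
      (if PySem.Set.contains st.1 kw then st
       else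
         match kw.toList with
         | [] => (PySem.Set.add st.1 kw, st.2.1, true)
         | c :: _ => (PySem.Set.add st.1 kw,
                      st.2.1.insert c (st.2.1.getD c [] ++ [kw]), st.2.2)) := by
  by_cases hc : PySem.Set.contains st.1 kw = true
  · rw [if_pos hc]
    have hL : L kw := (h.1 kw).mp ((PySem.Set.contains_iff _ _).mp hc)
    refine pvInv_congr h (fun x => ⟨Or.inl, ?_⟩)
    rintro (hx | rfl)
    · exact hx
    · exact hL
  · rw [if_neg hc]
    cases hkw : kw.toList with
    | nil =>
      have hkw' : kw = "" := by rw [← @String.ofList_toList kw, hkw]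
      subst hkw'
      refine ⟨fun x => ?_, ?_, fun c x => ?_⟩
      · rw [PySem.Set.mem_add, h.1]
      · simp
      · rw [h.2.2 c x]
        constructor
        · exact fun ⟨hl, hh⟩ => ⟨Or.inl hl, hh⟩
        · rintro ⟨hl | rfl, hh⟩
          · exact ⟨hl, hh⟩
          · simp at hh
    | cons c rest =>
      have hne : kw ≠ "" := by
        intro h0; rw [h0] at hkw; simp at hkw
      refine ⟨fun x => ?_, ?_, fun c' x => ?_⟩
      · rw [PySem.Set.mem_add, h.1]
      · dsimp only
        rw [h.2.1]
        constructor
        · exact Or.inl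
        · rintro (hl | h0)
          · exact hl
          · exact absurd h0.symm hne
      · dsimp only
        rw [PySem.Dict.getD_insert]
        by_cases hcc : c' = c
        · subst hcc
          rw [if_pos rfl, List.mem_append, List.mem_singleton, h.2.2 c' x]
          constructor
          · rintro (⟨hl, hh⟩ | rfl)
            · exact ⟨Or.inl hl, hh⟩
            · exact ⟨Or.inr rfl, by rw [hkw]; rfl⟩
          · rintro ⟨hl | rfl, hh⟩
            · exact Or.inl ⟨hl, hh⟩
            · exact Or.inr rfl
        · rw [if_neg hcc, h.2.2 c' x]
          constructor
          · rintro ⟨hl, hh⟩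
            exact ⟨Or.inl hl, hh⟩
          · rintro ⟨hl | rfl, hh⟩
            · exact ⟨hl, hh⟩
            · rw [hkw] at hh
              simp at hh
              exact absurd hh.symm hcc

theorem pvInv_inner (kws : List String) :
    ∀ (st : PySem.Set String × PySem.Dict Char (List String) × Bool) (L : String → Prop), pvInv L st →
      pvInv (fun x => L x ∨ x ∈ kws)
        (kws.foldl
          (fun st kw =>
            if PySem.Set.contains st.1 kw then st
            else
              match kw.toList with
              | [] => (PySem.Set.add st.1 kw, st.2.1, true)
              | c :: _ => (PySem.Set.add st.1 kw,
                           st.2.1.insert c (st.2.1.getD c [] ++ [kw]), st.2.2))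
          st) := by
  induction kws with
  | nil =>
    intro st L h
    exact pvInv_congr h (fun x => by simp)
  | cons kw t ih =>
    intro st L h
    have h2 := ih _ _ (pvInv_step h kw)
    exact pvInv_congr h2 (fun x => by simp [or_assoc])

theorem pv_index_inv (categories : List (String × List String)) :
    pvInv (fun x => ∃ ck ∈ categories, x ∈ ck.2) (pvBuildIndex categories) := by
  have base : pvInv (fun _ => False)
      ((PySem.Set.empty : PySem.Set String), (PySem.Dict.empty : PySem.Dict Char (List String)), false) := by
    refine ⟨fun x => ?_, by simp, fun c x => ?_⟩
    · simp [PySem.Set.empty]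
    · simp [PySem.Dict.getD_empty]
  have main : ∀ (l : List (String × List String)) (st : PySem.Set String × PySem.Dict Char (List String) × Bool)
      (L : String → Prop), pvInv L st →
      pvInv (fun x => L x ∨ ∃ ck ∈ l, x ∈ ck.2)
        (l.foldl
          (fun st ck =>
            ck.2.foldl
              (fun st kw =>
                if PySem.Set.contains st.1 kw then st
                else
                  match kw.toList with
                  | [] => (PySem.Set.add st.1 kw, st.2.1, true)
                  | c :: _ => (PySem.Set.add st.1 kw,
                               st.2.1.insert c (st.2.1.getD c [] ++ [kw]), st.2.2))
              st)
          st) := by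
    intro l
    induction l with
    | nil =>
      intro st L h
      exact pvInv_congr h (fun x => by simp)
    | cons ck t ih =>
      intro st L h
      have h2 := ih _ _ (pvInv_inner ck.2 st L h)
      exact pvInv_congr h2 (fun x => by
        simp only [List.mem_cons]
        constructor
        · rintro ((hl | hk) | ⟨c, hc, hx⟩)
          · exact Or.inl hl
          · exact Or.inr ⟨ck, Or.inl rfl, hk⟩
          · exact Or.inr ⟨c, Or.inr hc, hx⟩
        · rintro (hl | ⟨c, hc, hx⟩)
          · exact Or.inl (Or.inl hl)
          · rcases hc with rfl | hc
            · exact Or.inl (Or.inr hx)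
            · exact Or.inr ⟨c, hc, hx⟩)
  have h := main categories _ _ base
  exact pvInv_congr h (fun x => by simp)

-- membership through the inner scan fold
theorem pv_scan_inner_mem (textL : List Char) (j : Int) (kws : List String) :
    ∀ (m : PySem.Set String) (x : String),
      x ∈ kws.foldl
            (fun m kw =>
              if PySem.Chars.startswith (textL.drop j.toNat) kw.toList then PySem.Set.add m kw else m)
            m
        ↔ x ∈ m ∨ (x ∈ kws ∧ PySem.Chars.startswith (textL.drop j.toNat) x.toList = true) := by
  induction kws with
  | nil => intro m x; simp
  | cons kw t ih =>
    intro m x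
    simp only [List.foldl_cons]
    rw [ih]
    by_cases hs : PySem.Chars.startswith (textL.drop j.toNat) kw.toList = true
    · rw [if_pos hs, PySem.Set.mem_add]
      constructor
      · rintro ((hm | rfl) | ⟨hx, hsx⟩)
        · exact Or.inl hm
        · exact Or.inr ⟨List.mem_cons_self, hs⟩
        · exact Or.inr ⟨List.mem_cons_of_mem _ hx, hsx⟩
      · rintro (hm | ⟨hx, hsx⟩)
        · exact Or.inl (Or.inl hm)
        · rcases List.mem_cons.mp hx with rfl | hx
          · exact Or.inl (Or.inr rfl)
          · exact Or.inr ⟨hx, hsx⟩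
    · rw [if_neg hs]
      constructor
      · rintro (hm | ⟨hx, hsx⟩)
        · exact Or.inl hm
        · exact Or.inr ⟨List.mem_cons_of_mem _ hx, hsx⟩
      · rintro (hm | ⟨hx, hsx⟩)
        · exact Or.inl hm
        · rcases List.mem_cons.mp hx with rfl | hx
          · exact absurd hsx hs
          · exact Or.inr ⟨hx, hsx⟩

-- membership in the matched set computed by pvScan
theorem pv_scan_mem (byFirst : PySem.Dict Char (List String)) (hasEmpty : Bool)
    (textL : List Char) (x : String) :
    x ∈ pvScan byFirst hasEmpty textL ↔
      (hasEmpty = true ∧ x = "") ∨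
      ∃ jc ∈ PySem.List.enumerate textL 0,
        x ∈ byFirst.getD jc.2 [] ∧
          PySem.Chars.startswith (textL.drop jc.1.toNat) x.toList = true := by
  have outer : ∀ (l : List (Int × Char)) (m : PySem.Set String),
      x ∈ l.foldl
            (fun m jc =>
              (byFirst.getD jc.2 []).foldl
                (fun m kw =>
                  if PySem.Chars.startswith (textL.drop jc.1.toNat) kw.toList then PySem.Set.add m kw
                  else m)
                m)
            m
        ↔ x ∈ m ∨ ∃ jc ∈ l, x ∈ byFirst.getD jc.2 [] ∧
            PySem.Chars.startswith (textL.drop jc.1.toNat) x.toList = true := by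
    intro l
    induction l with
    | nil => intro m; simp
    | cons jc t ih =>
      intro m
      simp only [List.foldl_cons]
      rw [ih, pv_scan_inner_mem]
      constructor
      · rintro ((hm | ⟨hx, hsx⟩) | ⟨p, hp, hxp⟩)
        · exact Or.inl hm
        · exact Or.inr ⟨jc, List.mem_cons_self, hx, hsx⟩
        · exact Or.inr ⟨p, List.mem_cons_of_mem _ hp, hxp⟩
      · rintro (hm | ⟨p, hp, hxp⟩)
        · exact Or.inl (Or.inl hm)
        · rcases List.mem_cons.mp hp with rfl | hp
          · exact Or.inl (Or.inr hxp)
          · exact Or.inr ⟨p, hp, hxp⟩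
  unfold pvScan
  rw [outer]
  cases hasEmpty with
  | true =>
    rw [if_pos rfl, PySem.Set.mem_ofList]
    simp
  | false =>
    rw [if_neg (by simp)]
    simp [PySem.Set.empty]

-- for a keyword occurring in the categories, scan membership = Python's 'kw in text'
theorem pv_scan_eq_isIn (categories : List (String × List String)) (text : String)
    (kw : String) (hkw : ∃ ck ∈ categories, kw ∈ ck.2) :
    PySem.Set.contains
        (pvScan (pvBuildIndex categories).2.1 (pvBuildIndex categories).2.2 text.toList) kw
      = PySem.Str.isIn kw text := by
  obtain ⟨hseen, hempty, hdict⟩ := pv_index_inv categories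
  rw [Bool.eq_iff_iff, PySem.Set.contains_iff, pv_scan_mem]
  by_cases h0 : kw = ""
  · subst h0
    constructor
    · intro _
      rw [PySem.Str.isIn_iff_infix]
      simp
    · intro _
      exact Or.inl ⟨hempty.mpr hkw, rfl⟩
  · have hnil : kw.toList ≠ [] := by
      intro hx
      exact h0 (by rw [← @String.ofList_toList kw, hx])
    obtain ⟨c, rest, hkwl⟩ := List.exists_cons_of_ne_nil hnil
    constructor
    · rintro (⟨_, h1⟩ | ⟨jc, _, hx, hsx⟩)
      · exact absurd h1 h0
      · rw [PySem.Str.isIn_iff_infix, List.infix_iff_prefix_suffix]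
        exact ⟨text.toList.drop jc.1.toNat,
               (PySem.Chars.startswith_iff _ _).mp hsx, List.drop_suffix _ _⟩
    · intro hin
      have hci : PySem.Chars.isIn kw.toList text.toList = true := by
        rw [PySem.Chars.isIn_iff_infix]
        exact (PySem.Str.isIn_iff_infix _ _).mp hin
      obtain ⟨j, hj⟩ := (PySem.Chars.exists_prefix_drop_iff_isIn kw.toList text.toList).mpr hci
      have hjlt : j < text.toList.length := by
        by_contra hge
        rw [List.drop_eq_nil_of_le (le_of_not_gt hge), List.prefix_nil] at hj
        exact hnil hj
      have hdropj := List.drop_eq_getElem_cons hjlt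
      have hj' := hj
      rw [hdropj, hkwl] at hj'
      have hc : c = text.toList[j] := (List.cons_prefix_cons.mp hj').1
      refine Or.inr ⟨((j : Int), text.toList[j]), ?_, ?_, ?_⟩
      · rw [PySem.List.mem_enumerate_iff]
        exact ⟨j, hjlt, by simp⟩
      · rw [hdict]
        exact ⟨hkw, by rw [hkwl, hc]; rfl⟩
      · rw [PySem.Chars.startswith_iff]
        simpa [Int.toNat_natCast] using hj

-- A's running-best fold equals B's (set-scored) running-best fold, per video
theorem pv_fold_eq (categories : List (String × List String)) (text : String) :
    categories.foldl
      (fun (b : String × Int) ck =>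
        let mcount := pvMatchCount ck.2 text
        if mcount > b.2 then (ck.1, mcount) else b)
      ("infrastructure", 0)
    = categories.foldl
      (fun (b : String × Int) ck =>
        let score := pvSetCount ck.2
          (pvScan (pvBuildIndex categories).2.1 (pvBuildIndex categories).2.2 text.toList)
        if score > b.2 then (ck.1, score) else b)
      ("infrastructure", 0) := by
  refine PySem.List.foldl_congr_mem categories _ _ _ (fun b ck hck => ?_)
  have hcount : pvMatchCount ck.2 text
      = pvSetCount ck.2
          (pvScan (pvBuildIndex categories).2.1 (pvBuildIndex categories).2.2 text.toList) := by
    unfold pvMatchCount pvSetCount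
    refine congrArg _ (congrArg _ (List.filter_congr fun x hx => ?_))
    exact (pv_scan_eq_isIn categories text x ⟨ck, hck, hx⟩).symm
  simp only [hcount]

-- ===== VERDICT (by name: the statement is the Claim_ definition above) =====
theorem categorize_videos_spec : Claim_equal_categorize_videos := by
  intro videos categories _
  unfold Spec_categorize_videos
  simp only [categorize_videos, categorize_videos_alt]
  rw [PySem.List.foldl_append_singleton_eq_map]
  exact List.map_congr_left (fun v _ => by rw [pv_fold_eq])
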